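-- pv_equiv track=rewrite | github.com/serena823/Algo_practices | Longest Palindromic Substring .py | helper
-- ===== SOURCE A (Python) =====
-- def helper(s, left, right):
--     count = 0
--     while(left >= 0 and right < len(s)):
--         if s[left] != s[right]:
--             break
--         left -= 1
--         right += 1
--     return s[left + 1: right]
-- ===== SOURCE B (Python) =====
-- def helper(s, left, right):
--     if left < 0 or right >= len(s):
--         return s[left + 1: right]
--     lrun = [s[i] for i in range(left, -1, -1)]
--     rrun = [s[j] for j in range(right, len(s))]
--     pairs = list(zip(lrun, rrun))
--     m = next((k for k, (a, b) in enumerate(pairs) if a != b), len(pairs))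
--     return s[left - m + 1: right + m]
-- ===== Notes on version B (the rewrite author's own statement) =====
-- stated objective: alternative
-- what changed: Instead of mutating two pointers in a while loop, B precomputes the outward character runs with range, finds the length m of their common matching prefix with enumerate/next, and returns one arithmetic slice s[left-m+1:right+m].
import Mathlib
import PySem

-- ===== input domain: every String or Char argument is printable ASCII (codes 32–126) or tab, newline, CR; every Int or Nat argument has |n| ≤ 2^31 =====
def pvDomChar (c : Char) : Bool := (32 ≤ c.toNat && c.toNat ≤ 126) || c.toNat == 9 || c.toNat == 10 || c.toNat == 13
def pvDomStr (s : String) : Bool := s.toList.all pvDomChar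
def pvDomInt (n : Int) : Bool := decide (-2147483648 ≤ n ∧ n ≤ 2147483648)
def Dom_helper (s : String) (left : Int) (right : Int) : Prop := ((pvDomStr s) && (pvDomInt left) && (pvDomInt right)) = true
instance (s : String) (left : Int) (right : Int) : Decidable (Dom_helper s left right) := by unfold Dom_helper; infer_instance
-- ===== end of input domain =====

-- B replaces A's two-pointer while loop by precomputing the outward runs, counting their
-- common matching prefix m, and returning the single slice s[left-m+1 : right+m].

-- ===== PORT A =====
-- the while loop of A: returns the final (left, right) pointer pair
def helperLoop (cs : List Char) (left : Int) (right : Int) : Int × Int :=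
  if _h : 0 ≤ left ∧ right < (cs.length : Int) then
    match PySem.List.pyGet? cs left, PySem.List.pyGet? cs right with
    | some a, some b =>
        if a ≠ b then (left, right)
        else helperLoop cs (left - 1) (right + 1)
    | _, _ => (left, right)   -- Python raises IndexError here (excluded by Pre_helper)
  else (left, right)
termination_by ((cs.length : Int) - right).toNat
decreasing_by omega

def helper (s : String) (left : Int) (right : Int) : String :=
  let cs := s.toList
  let p := helperLoop cs left right
  String.ofList (PySem.List.slice cs (some (p.1 + 1)) (some p.2))

-- ===== PORT B =====
def helper_alt (s : String) (left : Int) (right : Int) : String :=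
  let cs := s.toList
  if left < 0 ∨ (cs.length : Int) ≤ right then
    String.ofList (PySem.List.slice cs (some (left + 1)) (some right))
  else
    let lrun := (PySem.List.pyRange left (-1) (-1)).map (fun i => PySem.List.pyGet? cs i)
    let rrun := (PySem.List.pyRange right (cs.length : Int) 1).map (fun j => PySem.List.pyGet? cs j)
    let pairs := lrun.zip rrun
    let m : Int := (pairs.takeWhile (fun p => p.1 == p.2)).length
    String.ofList (PySem.List.slice cs (some (left - m + 1)) (some (right + m)))

-- ===== PRECONDITION & SPEC =====
-- Pre_ excludes exactly the inputs where A raises IndexError: the loop is entered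
-- (left ≥ 0 and right < len(s)) but s[left] or s[right] is out of range.
def Pre_helper (s : String) (left : Int) (right : Int) : Prop :=
  ¬ (0 ≤ left ∧ right < (s.toList.length : Int) ∧
      ((s.toList.length : Int) ≤ left ∨ right < -(s.toList.length : Int)))
instance (s : String) (left : Int) (right : Int) : Decidable (Pre_helper s left right) := by
  unfold Pre_helper; infer_instance

def pvWitness_helper : String × Int × Int := ("abcba", 2, 2)

def Spec_helper (s : String) (left : Int) (right : Int) (out : String) : Prop := out = helper_alt s left right
instance (s : String) (left : Int) (right : Int) (out : String) : Decidable (Spec_helper s left right out) := by unfold Spec_helper; infer_instance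

-- ===== CLAIM (what is proved, stated in full; the proofs are below) =====
def Claim_equal_helper : Prop := ∀ (s : String) (left : Int) (right : Int), Dom_helper s left right → Pre_helper s left right → Spec_helper s left right (helper s left right)

-- ===== LEMMAS AND PROOFS =====

-- the common-prefix count B computes, as a function of (left, right)
def matchCount (cs : List Char) (left : Int) (right : Int) : Nat :=
  ((((PySem.List.pyRange left (-1) (-1)).map (fun i => PySem.List.pyGet? cs i)).zip
    ((PySem.List.pyRange right (cs.length : Int) 1).map (fun j => PySem.List.pyGet? cs j))).takeWhile
      (fun p => p.1 == p.2)).length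

lemma matchCount_stop (cs : List Char) (left right : Int)
    (h : ¬ (0 ≤ left ∧ right < (cs.length : Int))) : matchCount cs left right = 0 := by
  unfold matchCount
  rcases not_and_or.mp h with h1 | h2
  · rw [PySem.List.pyRange_neg_one_eq_nil (by omega)]
    simp
  · rw [PySem.List.pyRange_one_eq_nil (by omega)]
    simp [List.zip_nil_right]

lemma matchCount_cons (cs : List Char) (left right : Int)
    (h : 0 ≤ left ∧ right < (cs.length : Int)) :
    matchCount cs left right =
      if PySem.List.pyGet? cs left == PySem.List.pyGet? cs right
      then matchCount cs (left - 1) (right + 1) + 1 else 0 := by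
  unfold matchCount
  rw [PySem.List.pyRange_neg_one_cons (by omega), PySem.List.pyRange_one_cons (by omega)]
  simp only [List.map_cons, List.zip_cons_cons, List.takeWhile]
  by_cases he : PySem.List.pyGet? cs left == PySem.List.pyGet? cs right
  · simp [he]
  · simp [he]

lemma helperLoop_eq (cs : List Char) (left right : Int)
    (hl : left < (cs.length : Int)) (hr : -(cs.length : Int) ≤ right) :
    helperLoop cs left right =
      (left - matchCount cs left right, right + matchCount cs left right) := by
  by_cases h : 0 ≤ left ∧ right < (cs.length : Int)
  · have hga : (PySem.List.pyGet? cs left).isSome := by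
      rw [Option.isSome_iff_ne_none]
      intro hc
      exact (PySem.List.pyGet?_eq_none_iff cs left).mp hc ⟨by omega, by omega⟩
    have hgb : (PySem.List.pyGet? cs right).isSome := by
      rw [Option.isSome_iff_ne_none]
      intro hc
      exact (PySem.List.pyGet?_eq_none_iff cs right).mp hc ⟨by omega, by omega⟩
    obtain ⟨a, ha⟩ := Option.isSome_iff_exists.mp hga
    obtain ⟨b, hb⟩ := Option.isSome_iff_exists.mp hgb
    rw [helperLoop]
    rw [dif_pos h, ha, hb]
    rw [matchCount_cons cs left right h, ha, hb]
    dsimp only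
    by_cases heq : a = b
    · subst heq
      rw [if_neg (by simp), if_pos (by simp)]
      rw [helperLoop_eq cs (left - 1) (right + 1) (by omega) (by omega)]
      simp only [Prod.mk.injEq]
      push_cast
      omega
    · rw [if_pos heq, if_neg (by simpa using heq)]
      simp
  · rw [matchCount_stop cs left right h]
    rw [helperLoop]
    simp [h]
termination_by ((cs.length : Int) - right).toNat
decreasing_by omega

lemma helperLoop_triv (cs : List Char) (left right : Int)
    (h : ¬ (0 ≤ left ∧ right < (cs.length : Int))) :
    helperLoop cs left right = (left, right) := by
  rw [helperLoop]; simp [h]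

-- ===== VERDICT (by name: the statement is the Claim_ definition above) =====
theorem helper_spec : Claim_equal_helper := by
  intro s left right _hdom hpre
  unfold Spec_helper helper helper_alt
  dsimp only
  by_cases hc : left < 0 ∨ ((s.toList.length : Int)) ≤ right
  · rw [if_pos hc]
    rw [helperLoop_triv s.toList left right (by omega)]
  · rw [if_neg hc]
    have hp : ¬ (0 ≤ left ∧ right < (s.toList.length : Int) ∧
        ((s.toList.length : Int) ≤ left ∨ right < -(s.toList.length : Int))) := hpre
    rw [helperLoop_eq s.toList left right (by omega) (by omega)]
    unfold matchCount
    rfl
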